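-- pv_equiv track=rewrite | github.com/alopatindev/math | systems/gauss_jordan_functional.py | make_zero_recursive
-- ===== SOURCE A (Python) =====
-- def get_line(abn, i):
--     a, b, n = abn
--     start = i * n
--     return a[start : (start + n)], b[i]
--
-- def aij(an, i, j):
--     a, n = an
--     return a[i * n + j]
--
-- def update_line(abn, i, f):
--     def update_line_internal(a1a2n, f):
--         a1, a2, n = a1a2n
--         am = zip(a1, a2)
--         return list(map(f, am))
--     a, b, n = abn
--     i1, i2 = i
--     a1, b1 = get_line((a, b, n), i1)
--     a2, b2 = get_line((a, b, n), i2)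
--     a_new = update_line_internal((a1, a2, n), f)
--     b_new = f([b1, b2])
--     return a_new, b_new
--
-- def replace_line(abn, ai, bi, i):
--     a, b, n = abn
--     a_new = a[0 : i*n] + ai + a[((i + 1) * n) : (n * n)]
--     b_new = b[0 : i] + [bi] + b[(i + 1) : n]
--     return a_new, b_new
--
-- def make_zero(abn, i, j):
--     a, b, n = abn
--     mul = aij((a, n), i, j)
--     ai, bi = update_line(abn, (i, j), lambda a: a[0] - a[1] * mul)
--     return replace_line(abn, ai, bi, i)
--
-- def make_zero_recursive(abn, i, j):
--     a, b, n = abn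
--     if i < n:
--         if i != j:
--             a_new, b_new = make_zero(abn, i, j)
--             return make_zero_recursive((a_new, b_new, n), i + 1, j)
--         else:
--             return make_zero_recursive((a, b, n), i + 1, j)
--     else:
--         return a, b
-- ===== SOURCE B (Python) =====
-- def make_zero_recursive(abn, i, j):
--     # Single pass: build the result row by row instead of recursively
--     # re-concatenating the whole n*n matrix for every eliminated row.
--     a, b, n = abn
--     if i >= n:
--         return a, b
--
--     def row(r):
--         if i <= r and r != j:
--             mul = a[r * n + j]
--             return ([a[r * n + c] - a[j * n + c] * mul for c in range(n)],
--                     b[r] - b[j] * mul)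
--         return a[r * n:(r + 1) * n], b[r]
--
--     rows = [row(r) for r in range(n)]
--     a_new = [x for ar, _ in rows for x in ar]
--     b_new = [br for _, br in rows]
--     return a_new, b_new
-- ===== Notes on version B (the rewrite author's own statement) =====
-- stated objective: alternative
-- what changed: Instead of A's recursion that, for every eliminated row, rebuilds the whole flattened n*n matrix by slicing and concatenation, B makes a single pass that constructs each output row directly from the original matrix (row j is never modified, so each row's update depends only on the input).
-- outside the precondition, e.g. on make_zero_recursive(([1, 2, 3], [1], 1), 0, 0): A returns ([1, 2, 3], [1]), B returns ([1], [1])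
import Mathlib
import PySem

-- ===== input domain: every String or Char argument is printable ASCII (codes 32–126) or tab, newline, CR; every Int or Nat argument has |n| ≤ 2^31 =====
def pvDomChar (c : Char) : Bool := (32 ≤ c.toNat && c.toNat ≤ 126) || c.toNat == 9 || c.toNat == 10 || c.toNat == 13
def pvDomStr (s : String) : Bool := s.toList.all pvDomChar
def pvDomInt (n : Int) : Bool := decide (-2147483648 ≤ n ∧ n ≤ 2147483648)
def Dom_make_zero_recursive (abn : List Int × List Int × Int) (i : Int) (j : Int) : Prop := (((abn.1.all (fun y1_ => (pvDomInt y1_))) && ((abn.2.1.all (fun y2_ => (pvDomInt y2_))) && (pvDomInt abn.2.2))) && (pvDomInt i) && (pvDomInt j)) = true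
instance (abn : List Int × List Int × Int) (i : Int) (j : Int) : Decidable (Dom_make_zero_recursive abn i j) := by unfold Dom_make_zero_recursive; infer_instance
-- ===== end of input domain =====

-- B replaces A's per-row whole-matrix reslicing/concatenation recursion by one pass that
-- builds each output row directly from the input matrix (objective: alternative).

-- ===== PORT A =====
-- get_line(abn, i)
def pvGetLine (abn : List Int × List Int × Int) (i : Int) : List Int × Int :=
  let a := abn.1; let b := abn.2.1; let n := abn.2.2
  let start := i * n
  (PySem.List.slice a (some start) (some (start + n)), PySem.List.pyGetD b i 0)

-- aij(an, i, j)
def pvAij (an : List Int × Int) (i : Int) (j : Int) : Int :=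
  PySem.List.pyGetD an.1 (i * an.2 + j) 0

-- update_line_internal((a1, a2, n), f)
def pvUpdateLineInternal (a1a2n : List Int × List Int × Int) (f : Int × Int → Int) : List Int :=
  (a1a2n.1.zip a1a2n.2.1).map f

-- update_line(abn, i, f)
def pvUpdateLine (abn : List Int × List Int × Int) (i : Int × Int) (f : Int × Int → Int) :
    List Int × Int :=
  let a := abn.1; let b := abn.2.1; let n := abn.2.2
  let l1 := pvGetLine (a, b, n) i.1
  let l2 := pvGetLine (a, b, n) i.2
  (pvUpdateLineInternal (l1.1, l2.1, n) f, f (l1.2, l2.2))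

-- replace_line(abn, ai, bi, i)
def pvReplaceLine (abn : List Int × List Int × Int) (ai : List Int) (bi : Int) (i : Int) :
    List Int × List Int :=
  let a := abn.1; let b := abn.2.1; let n := abn.2.2
  (PySem.List.slice a (some 0) (some (i * n)) ++ ai ++
     PySem.List.slice a (some ((i + 1) * n)) (some (n * n)),
   PySem.List.slice b (some 0) (some i) ++ [bi] ++
     PySem.List.slice b (some (i + 1)) (some n))

-- make_zero(abn, i, j)
def pvMakeZero (abn : List Int × List Int × Int) (i : Int) (j : Int) : List Int × List Int :=
  let mul := pvAij (abn.1, abn.2.2) i j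
  let aibi := pvUpdateLine abn (i, j) (fun p => p.1 - p.2 * mul)
  pvReplaceLine abn aibi.1 aibi.2 i

def make_zero_recursive (abn : List Int × List Int × Int) (i : Int) (j : Int) :
    List Int × List Int :=
  if i < abn.2.2 then
    if i ≠ j then
      let ab2 := pvMakeZero abn i j
      make_zero_recursive (ab2.1, ab2.2, abn.2.2) (i + 1) j
    else
      make_zero_recursive (abn.1, abn.2.1, abn.2.2) (i + 1) j
  else (abn.1, abn.2.1)
termination_by (abn.2.2 - i).toNat
decreasing_by all_goals omega

-- ===== PORT B =====
-- row(r) of Source B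
def pvRowB (a : List Int) (b : List Int) (n i j r : Int) : List Int × Int :=
  if i ≤ r ∧ r ≠ j then
    let mul := PySem.List.pyGetD a (r * n + j) 0
    ((PySem.List.pyRange 0 n 1).map
        (fun c => PySem.List.pyGetD a (r * n + c) 0 - PySem.List.pyGetD a (j * n + c) 0 * mul),
     PySem.List.pyGetD b r 0 - PySem.List.pyGetD b j 0 * mul)
  else
    (PySem.List.slice a (some (r * n)) (some ((r + 1) * n)), PySem.List.pyGetD b r 0)

def make_zero_recursive_alt (abn : List Int × List Int × Int) (i : Int) (j : Int) :
    List Int × List Int :=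
  if abn.2.2 ≤ i then (abn.1, abn.2.1)
  else
    let rows := (PySem.List.pyRange 0 abn.2.2 1).map (fun r => pvRowB abn.1 abn.2.1 abn.2.2 i j r)
    (rows.flatMap Prod.fst, rows.map Prod.snd)

-- ===== PRECONDITION & SPEC =====
-- Pre_ excludes calls with i < n whose start row i or pivot column j is negative or whose
-- flattened matrix/vector lengths do not match n: there A's value (when it does not raise
-- IndexError) comes from Python's negative-index wraparound and slice clamping/truncation,
-- an accident of A's representation that is no more canonical than B's value.
def Pre_make_zero_recursive (abn : List Int × List Int × Int) (i : Int) (j : Int) : Prop :=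
  abn.2.2 ≤ i ∨
    (0 ≤ i ∧ 0 ≤ j ∧ j < abn.2.2 ∧
      (abn.1.length : Int) = abn.2.2 * abn.2.2 ∧ (abn.2.1.length : Int) = abn.2.2)
instance (abn : List Int × List Int × Int) (i : Int) (j : Int) :
    Decidable (Pre_make_zero_recursive abn i j) := by unfold Pre_make_zero_recursive; infer_instance

def pvWitness_make_zero_recursive : (List Int × List Int × Int) × Int × Int :=
  (([2, 1, 4, 3], [5, 6], 2), 0, 1)

def Spec_make_zero_recursive (abn : List Int × List Int × Int) (i : Int) (j : Int)
    (out : List Int × List Int) : Prop := out = make_zero_recursive_alt abn i j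
instance (abn : List Int × List Int × Int) (i : Int) (j : Int) (out : List Int × List Int) :
    Decidable (Spec_make_zero_recursive abn i j out) := by
  unfold Spec_make_zero_recursive; infer_instance

-- ===== CLAIM (what is proved, stated in full; the proofs are below) =====
def Claim_equal_make_zero_recursive : Prop :=
  ∀ (abn : List Int × List Int × Int) (i : Int) (j : Int),
    Dom_make_zero_recursive abn i j → Pre_make_zero_recursive abn i j →
      Spec_make_zero_recursive abn i j (make_zero_recursive abn i j)

-- ===== LEMMAS AND PROOFS =====

-- B's row construction, without the i ≥ n short-circuit (the common normal form).
def pvBelim (a : List Int) (b : List Int) (n i j : Int) : List Int × List Int :=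
  let rows := (PySem.List.pyRange 0 n 1).map (fun r => pvRowB a b n i j r)
  (rows.flatMap Prod.fst, rows.map Prod.snd)

-- a slice of length m starting at s, as a map over range m
lemma slice_eq_map_get (a : List Int) (s m : Int) (hs : 0 ≤ s) (hm : 0 ≤ m)
    (hsm : s + m ≤ (a.length : Int)) :
    PySem.List.slice a (some s) (some (s + m)) =
      (PySem.List.pyRange 0 m 1).map (fun c => PySem.List.pyGetD a (s + c) 0) := by
  obtain ⟨S, rfl⟩ := Int.eq_ofNat_of_zero_le hs
  obtain ⟨M, rfl⟩ := Int.eq_ofNat_of_zero_le hm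
  rw [PySem.List.slice_natCast_add, PySem.List.pyRange_zero_natCast, List.map_map]
  have hlen : S + M ≤ a.length := by exact_mod_cast hsm
  apply List.ext_getElem
  · simp; omega
  · intro k h1 h2
    simp only [List.getElem_take, List.getElem_drop, List.getElem_map, List.getElem_range,
      Function.comp_apply]
    have hk : k < M := by simpa using h2
    have hc : ((S : Int) + (k : Int)) = ((S + k : Nat) : Int) := by push_cast; ring
    rw [hc, PySem.List.pyGetD_natCast, List.getD_eq_getElem _ _ (by omega)]

-- all-copy rows reassemble a
lemma flat_slices (a : List Int) (n : Int) (hn : 0 ≤ n) (ha : (a.length : Int) = n * n) :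
    ((PySem.List.pyRange 0 n 1).map
        (fun r => PySem.List.slice a (some (r * n)) (some ((r + 1) * n)))).flatten = a := by
  obtain ⟨N, rfl⟩ := Int.eq_ofNat_of_zero_le hn
  have ha' : a.length = N * N := by exact_mod_cast ha
  rw [PySem.List.pyRange_zero_natCast, List.map_map]
  have aux : ∀ (m k : Nat),
      ((List.range' k m).map ((fun r : Int => PySem.List.slice a (some (r * N)) (some ((r + 1) * N))) ∘
        (fun k : Nat => (k : Int)))).flatten = (a.drop (k * N)).take (m * N) := by
    intro m
    induction m with
    | zero => intro k; simp
    | succ m ih =>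
      intro k
      rw [List.range'_succ, List.map_cons, List.flatten_cons, ih (k + 1)]
      simp only [Function.comp_apply]
      have h1 : ((k : Int) * N) = ((k * N : Nat) : Int) := by push_cast; ring
      have h2 : ((k : Int) + 1) * N = ((k * N : Nat) : Int) + (N : Nat) := by push_cast; ring
      rw [h1, h2, PySem.List.slice_natCast_add]
      have h3 : (m + 1) * N = N + m * N := by ring
      have h4 : (k + 1) * N = k * N + N := by ring
      rw [h3, h4, List.take_add, ← List.drop_drop]

  rw [List.range_eq_range', aux N 0]
  simp [ha']

lemma map_gets (b : List Int) (n : Int) (hb : (b.length : Int) = n) :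
    (PySem.List.pyRange 0 n 1).map (fun r => PySem.List.pyGetD b r 0) = b := by
  have : n = (b.length : Int) := hb.symm
  subst this
  exact PySem.List.map_pyGetD_pyRange_zero' b 0

-- Belim with no active row is the identity
lemma belim_id (a b : List Int) (n i j : Int) (hn : 0 ≤ n) (hi : n ≤ i)
    (ha : (a.length : Int) = n * n) (hb : (b.length : Int) = n) :
    pvBelim a b n i j = (a, b) := by
  unfold pvBelim
  have hrow : ∀ r ∈ PySem.List.pyRange 0 n 1,
      pvRowB a b n i j r =
        (fun r => (PySem.List.slice a (some (r * n)) (some ((r + 1) * n)),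
          PySem.List.pyGetD b r 0)) r := by
    intro r hr
    rw [PySem.List.mem_pyRange_one] at hr
    rw [pvRowB, if_neg (by omega)]
  rw [List.map_congr_left hrow]
  simp only [List.flatMap_def, List.map_map, Function.comp_def, Prod.mk.injEq]
  exact ⟨flat_slices a n hn ha, map_gets b n hb⟩

-- skipping the pivot row i = j
lemma belim_skip (a b : List Int) (n i : Int) :
    pvBelim a b n (i + 1) i = pvBelim a b n i i := by
  unfold pvBelim
  have hrow : ∀ r ∈ PySem.List.pyRange 0 n 1,
      pvRowB a b n (i + 1) i r = pvRowB a b n i i r := by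
    intro r _
    by_cases hri : r = i
    · subst hri
      rw [pvRowB, pvRowB, if_neg (by simp), if_neg (by simp)]
    · rw [pvRowB, pvRowB]
      have : (i + 1 ≤ r ∧ r ≠ i) ↔ (i ≤ r ∧ r ≠ i) := by
        constructor <;> rintro ⟨h1, h2⟩ <;> exact ⟨by omega, h2⟩
      by_cases hc : i ≤ r ∧ r ≠ i
      · rw [if_pos (this.mpr hc), if_pos hc]
      · rw [if_neg (fun h => hc (this.mp h)), if_neg hc]
  rw [List.map_congr_left hrow]

-- the three-piece stitched list: getD outside / inside the replaced window, and its length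
lemma stitch_length (a mid : List Int) (P : Nat) (hP : P + mid.length ≤ a.length) :
    (a.take P ++ mid ++ a.drop (P + mid.length)).length = a.length := by
  simp; omega

lemma stitch_getD_out (a mid : List Int) (P K : Nat) (hP : P + mid.length ≤ a.length)
    (hK : K < P ∨ P + mid.length ≤ K) :
    (a.take P ++ mid ++ a.drop (P + mid.length)).getD K 0 = a.getD K 0 := by
  have hlt : (a.take P).length = P := by simp; omega
  rcases hK with hK | hK
  · rw [List.append_assoc, List.getD_append _ _ _ _ (by omega), List.getD_eq_getElem?_getD,
      List.getElem?_take, if_pos hK, ← List.getD_eq_getElem?_getD]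
  · have hlen2 : (a.take P ++ mid).length = P + mid.length := by simp; omega
    rw [List.getD_append_right _ _ _ _ (by rw [hlen2]; exact hK), hlen2,
      List.getD_eq_getElem?_getD, List.getElem?_drop, ← List.getD_eq_getElem?_getD]
    congr 1
    omega

lemma stitch_getD_in (a mid : List Int) (P K : Nat) (hP : P + mid.length ≤ a.length)
    (h1 : P ≤ K) (h2 : K < P + mid.length) :
    (a.take P ++ mid ++ a.drop (P + mid.length)).getD K 0 = mid.getD (K - P) 0 := by
  have hlt : (a.take P).length = P := by simp; omega
  rw [List.append_assoc, List.getD_append_right _ _ _ _ (by omega), hlt,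
    List.getD_append _ _ _ _ (by omega)]

lemma stitch_window (a mid : List Int) (P : Nat) (hP : P + mid.length ≤ a.length) :
    ((a.take P ++ mid ++ a.drop (P + mid.length)).drop P).take mid.length = mid := by
  have hlt : (a.take P).length = P := by simp; omega
  rw [List.append_assoc, List.drop_append_of_le_length (by omega)]
  simp

-- pvMakeZero written as the three-piece stitched pair
lemma makeZero_parts (a b : List Int) (n i j : Int) (hn : 0 < n) (hi : 0 ≤ i) (hin : i < n)
    (hj : 0 ≤ j) (hjn : j < n) (ha : (a.length : Int) = n * n) (hb : (b.length : Int) = n) :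
    pvMakeZero (a, b, n) i j =
      (a.take (i * n).toNat ++
         ((PySem.List.pyRange 0 n 1).map
           (fun c => PySem.List.pyGetD a (i * n + c) 0 -
             PySem.List.pyGetD a (j * n + c) 0 * PySem.List.pyGetD a (i * n + j) 0)) ++
         a.drop ((i * n).toNat + n.toNat),
       b.take i.toNat ++
         [PySem.List.pyGetD b i 0 -
           PySem.List.pyGetD b j 0 * PySem.List.pyGetD a (i * n + j) 0] ++
         b.drop (i.toNat + 1)) := by
  have hin' : (i + 1) * n ≤ n * n := mul_le_mul_of_nonneg_right (by omega) (by omega)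
  have hjn' : (j + 1) * n ≤ n * n := mul_le_mul_of_nonneg_right (by omega) (by omega)
  have hi0 : 0 ≤ i * n := mul_nonneg hi (by omega)
  have hj0 : 0 ≤ j * n := mul_nonneg hj (by omega)
  unfold pvMakeZero pvUpdateLine pvGetLine pvUpdateLineInternal pvAij pvReplaceLine
  simp only []
  have hie : i * n + n ≤ n * n := by have : (i + 1) * n = i * n + n := by ring
                                     omega
  have hje : j * n + n ≤ n * n := by have : (j + 1) * n = j * n + n := by ring
                                     omega
  rw [slice_eq_map_get a (i * n) n hi0 (by omega) (by omega),
      slice_eq_map_get a (j * n) n hj0 (by omega) (by omega),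
      List.zip_map', List.map_map]
  have hnn : (n * n).toNat = a.length := by omega
  have htt : ((i + 1) * n).toNat = (i * n).toNat + n.toNat := by
    have : (i + 1) * n = i * n + n := by ring
    omega
  have hti : (i + 1).toNat = i.toNat + 1 := by omega
  refine Prod.ext ?_ ?_
  · simp only []
    rw [PySem.List.slice_zero_start, PySem.List.slice_to _ hi0,
      PySem.List.slice_toNat _ (by omega) (by positivity), htt]
    have hpost : List.take ((n * n).toNat - ((i * n).toNat + n.toNat))
        (a.drop ((i * n).toNat + n.toNat)) = a.drop ((i * n).toNat + n.toNat) :=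
      List.take_of_length_le (by simp; omega)
    rw [hpost]
    rfl
  · simp only []
    rw [PySem.List.slice_zero_start, PySem.List.slice_to _ hi,
      PySem.List.slice_toNat _ (by omega) (by omega), hti]
    have hpost : List.take (n.toNat - (i.toNat + 1)) (b.drop (i.toNat + 1)) =
        b.drop (i.toNat + 1) :=
      List.take_of_length_le (by simp; omega)
    rw [hpost]


-- the elimination step commutes with Belim
lemma belim_step (a b : List Int) (n i j : Int) (hn : 0 < n) (hi : 0 ≤ i) (hin : i < n)
    (hj : 0 ≤ j) (hjn : j < n) (hij : i ≠ j)
    (ha : (a.length : Int) = n * n) (hb : (b.length : Int) = n) :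
    pvBelim (pvMakeZero (a, b, n) i j).1 (pvMakeZero (a, b, n) i j).2 n (i + 1) j =
      pvBelim a b n i j := by
  rw [makeZero_parts a b n i j hn hi hin hj hjn ha hb]
  -- abbreviations
  have hie : i * n + n ≤ n * n := by
    have h1 : (i + 1) * n ≤ n * n := mul_le_mul_of_nonneg_right (by omega) (by omega)
    have h2 : (i + 1) * n = i * n + n := by ring
    omega
  have hi0 : 0 ≤ i * n := mul_nonneg hi (by omega)
  have hj0 : 0 ≤ j * n := mul_nonneg hj (by omega)
  set MUL := PySem.List.pyGetD a (i * n + j) 0 with hMUL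
  set mid := (PySem.List.pyRange 0 n 1).map
      (fun c => PySem.List.pyGetD a (i * n + c) 0 -
        PySem.List.pyGetD a (j * n + c) 0 * MUL) with hmid
  have hmidlen : mid.length = n.toNat := by
    rw [hmid]; simp [PySem.List.length_pyRange_one]
  have hdropeq : (i * n).toNat + n.toNat = (i * n).toNat + mid.length := by rw [hmidlen]
  rw [hdropeq]
  set bi := PySem.List.pyGetD b i 0 - PySem.List.pyGetD b j 0 * MUL with hbi
  set A' := a.take (i * n).toNat ++ mid ++ a.drop ((i * n).toNat + mid.length) with hA'
  set B' := b.take i.toNat ++ [bi] ++ b.drop (i.toNat + 1) with hB'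
  have hPa : (i * n).toNat + mid.length ≤ a.length := by rw [hmidlen]; omega
  have hPb : i.toNat + [bi].length ≤ b.length := by simp; omega
  have hA'len : A'.length = a.length := stitch_length a mid (i * n).toNat hPa
  have hB'len : B'.length = b.length := stitch_length b [bi] i.toNat hPb
  -- reads outside the replaced row are unchanged
  have getA : ∀ r c : Int, 0 ≤ r → r < n → 0 ≤ c → c < n → r ≠ i →
      PySem.List.pyGetD A' (r * n + c) 0 = PySem.List.pyGetD a (r * n + c) 0 := by
    intro r c hr hrn hc hcn hri
    have hr0 : 0 ≤ r * n := mul_nonneg hr (by omega)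
    have h0 : 0 ≤ r * n + c := by omega
    have hcast : r * n + c = (((r * n + c).toNat : Nat) : Int) := (Int.toNat_of_nonneg h0).symm
    rw [hcast, PySem.List.pyGetD_natCast, PySem.List.pyGetD_natCast]
    apply stitch_getD_out a mid (i * n).toNat _ hPa
    rcases lt_or_gt_of_ne hri with hlt | hgt
    · left
      have e1 : (r + 1) * n ≤ i * n := mul_le_mul_of_nonneg_right (by omega) (by omega)
      have e2 : (r + 1) * n = r * n + n := by ring
      omega
    · right
      have e1 : (i + 1) * n ≤ r * n := mul_le_mul_of_nonneg_right (by omega) (by omega)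
      have e2 : (i + 1) * n = i * n + n := by ring
      omega
  have getB : ∀ r : Int, 0 ≤ r → r < n → r ≠ i →
      PySem.List.pyGetD B' r 0 = PySem.List.pyGetD b r 0 := by
    intro r hr hrn hri
    have hcast : r = ((r.toNat : Nat) : Int) := (Int.toNat_of_nonneg hr).symm
    rw [hcast, PySem.List.pyGetD_natCast, PySem.List.pyGetD_natCast]
    apply stitch_getD_out b [bi] i.toNat _ hPb
    simp only [List.length_cons, List.length_nil]
    omega
  -- the replaced row itself
  have winA : PySem.List.slice A' (some (i * n)) (some ((i + 1) * n)) = mid := by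
    have htt : ((i + 1) * n).toNat = (i * n).toNat + n.toNat := by
      have : (i + 1) * n = i * n + n := by ring
      omega
    rw [PySem.List.slice_toNat _ hi0 (by positivity), htt]
    have hcount : (i * n).toNat + n.toNat - (i * n).toNat = mid.length := by
      rw [hmidlen]; omega
    rw [hcount]
    exact stitch_window a mid (i * n).toNat hPa
  have winB : PySem.List.pyGetD B' i 0 = bi := by
    have hcast : i = ((i.toNat : Nat) : Int) := (Int.toNat_of_nonneg hi).symm
    rw [hcast, PySem.List.pyGetD_natCast]
    have h := stitch_getD_in b [bi] i.toNat i.toNat hPb (le_refl _) (by simp)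
    have h2 : [bi].getD (i.toNat - i.toNat) 0 = bi := by simp
    rw [h2] at h
    exact h
  -- rows coincide
  unfold pvBelim
  have hrow : ∀ r ∈ PySem.List.pyRange 0 n 1,
      pvRowB A' B' n (i + 1) j r = pvRowB a b n i j r := by
    intro r hr
    rw [PySem.List.mem_pyRange_one] at hr
    obtain ⟨hr0, hrn⟩ := hr
    by_cases hri : r = i
    · subst hri
      rw [pvRowB, pvRowB, if_neg (by omega), if_pos ⟨le_refl r, hij⟩]
      refine Prod.ext ?_ ?_
      · simpa using winA
      · simpa using winB
    · by_cases hact : i ≤ r ∧ r ≠ j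
      · rw [pvRowB, pvRowB, if_pos ⟨by omega, hact.2⟩, if_pos hact]
        have hmul : PySem.List.pyGetD A' (r * n + j) 0 = PySem.List.pyGetD a (r * n + j) 0 :=
          getA r j hr0 hrn hj hjn hri
        refine Prod.ext ?_ ?_
        · simp only []
          apply List.map_congr_left
          intro c hc
          rw [PySem.List.mem_pyRange_one] at hc
          rw [getA r c hr0 hrn hc.1 hc.2 hri, getA j c hj hjn hc.1 hc.2 (Ne.symm hij), hmul]
        · simp only []
          rw [getB r hr0 hrn hri, getB j hj hjn (Ne.symm hij), hmul]
      · rw [pvRowB, pvRowB, if_neg (by omega), if_neg hact]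
        refine Prod.ext ?_ ?_
        · simp only []
          have hrn1 : (r + 1) * n = r * n + n := by ring
          have hrnn : r * n + n ≤ n * n := by
            have h1 : (r + 1) * n ≤ n * n := mul_le_mul_of_nonneg_right (by omega) (by omega)
            omega
          have hr0' : 0 ≤ r * n := mul_nonneg hr0 (by omega)
          rw [hrn1, slice_eq_map_get A' (r * n) n hr0' (by omega) (by rw [hA'len]; omega),
            slice_eq_map_get a (r * n) n hr0' (by omega) (by omega)]
          apply List.map_congr_left
          intro c hc
          rw [PySem.List.mem_pyRange_one] at hc
          exact getA r c hr0 hrn hc.1 hc.2 hri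
        · simp only []
          exact getB r hr0 hrn hri
  rw [List.map_congr_left hrow]

lemma makeZero_len (a b : List Int) (n i j : Int) (hn : 0 < n) (hi : 0 ≤ i) (hin : i < n)
    (hj : 0 ≤ j) (hjn : j < n)
    (ha : (a.length : Int) = n * n) (hb : (b.length : Int) = n) :
    ((pvMakeZero (a, b, n) i j).1.length : Int) = n * n ∧
      ((pvMakeZero (a, b, n) i j).2.length : Int) = n := by
  rw [makeZero_parts a b n i j hn hi hin hj hjn ha hb]
  have hie : i * n + n ≤ n * n := by
    have h1 : (i + 1) * n ≤ n * n := mul_le_mul_of_nonneg_right (by omega) (by omega)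
    have h2 : (i + 1) * n = i * n + n := by ring
    omega
  have hi0 : 0 ≤ i * n := mul_nonneg hi (by omega)
  constructor
  · simp [PySem.List.length_pyRange_one]
    omega
  · simp
    omega

lemma main_eq (n j : Int) (hn : 0 < n) (hj : 0 ≤ j) (hjn : j < n) :
    ∀ (k : Nat) (a b : List Int) (i : Int), 0 ≤ i → (n - i).toNat = k →
      (a.length : Int) = n * n → (b.length : Int) = n →
      make_zero_recursive (a, b, n) i j = pvBelim a b n i j := by
  intro k
  induction k with
  | zero =>
    intro a b i hi hk ha hb
    rw [make_zero_recursive]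
    rw [if_neg (by simp only []; omega)]
    exact (belim_id a b n i j (by omega) (by omega) ha hb).symm
  | succ k ih =>
    intro a b i hi hk ha hb
    have hin : i < n := by omega
    rw [make_zero_recursive, if_pos (by simp only []; omega)]
    by_cases hij : i = j
    · rw [if_neg (by simp [hij])]
      subst hij
      rw [ih a b (i + 1) (by omega) (by omega) ha hb]
      exact belim_skip a b n i
    · rw [if_pos hij]
      obtain ⟨hla, hlb⟩ := makeZero_len a b n i j hn hi hin hj hjn ha hb
      rw [ih (pvMakeZero (a, b, n) i j).1 (pvMakeZero (a, b, n) i j).2 (i + 1)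
        (by omega) (by omega) hla hlb]
      exact belim_step a b n i j hn hi hin hj hjn hij ha hb

-- ===== VERDICT (by name: the statement is the Claim_ definition above) =====
theorem make_zero_recursive_spec : Claim_equal_make_zero_recursive := by
  intro abn i j _hdom hpre
  obtain ⟨a, b, n⟩ := abn
  unfold Spec_make_zero_recursive
  by_cases hge : n ≤ i
  · rw [make_zero_recursive]
    simp only [make_zero_recursive_alt]
    rw [if_neg (by omega), if_pos hge]
  · rcases hpre with h | ⟨hi, hj, hjn, ha, hb⟩
    · exact absurd h hge
    have hn : 0 < n := by omega
    rw [main_eq n j hn hj hjn (n - i).toNat a b i hi rfl ha hb]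
    simp only [make_zero_recursive_alt, pvBelim]
    rw [if_neg hge]
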